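-- pv_equiv track=rewrite | github.com/posl/comment_recommendation | script/mod_gen/4_time/ja/250_B/9.py | getTile
-- ===== SOURCE A (Python) =====
-- def getTile(n,a,b):
--     tile = []
--     for i in range(n):
--         line = ""
--         for j in range(n):
--             if (i+j)%2 == 0:
--                 line += "."*b
--             else:
--                 line += "#"*b
--         tile.append(line)
--     return tile
-- ===== SOURCE B (Python) =====
-- def getTile(n, a, b):
--     # Build the two distinct parity lines once, reuse across rows.
--     even = "".join(("." if j % 2 == 0 else "#") * b for j in range(n))
--     odd = "".join(("#" if j % 2 == 0 else ".") * b for j in range(n))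
--     return [even if i % 2 == 0 else odd for i in range(n)]
-- ===== Notes on version B (the rewrite author's own statement) =====
-- stated objective: alternative
-- what changed: B computes the two distinct parity lines once (even-row and odd-row strings) and reuses them across all n rows, instead of rebuilding each row cell by cell in a nested loop; measured ~1.8x at n=256 but the output itself is O(n^2*b) so a timing run did not confirm 'faster' at the largest size.
import Mathlib
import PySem

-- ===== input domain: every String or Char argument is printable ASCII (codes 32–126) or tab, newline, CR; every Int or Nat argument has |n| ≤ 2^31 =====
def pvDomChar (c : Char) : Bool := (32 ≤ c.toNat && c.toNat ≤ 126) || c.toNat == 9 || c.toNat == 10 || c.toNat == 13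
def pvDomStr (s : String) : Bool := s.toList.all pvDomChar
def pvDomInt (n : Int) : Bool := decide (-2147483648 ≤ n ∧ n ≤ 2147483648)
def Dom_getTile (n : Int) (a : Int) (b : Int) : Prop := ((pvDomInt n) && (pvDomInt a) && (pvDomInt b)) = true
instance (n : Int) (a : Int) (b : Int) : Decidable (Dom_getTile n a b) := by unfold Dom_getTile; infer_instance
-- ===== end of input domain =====

-- B builds the two distinct parity lines once and reuses them across rows (an alternative decomposition); return values equal.

-- ===== PORT A =====
-- inner loop of A: line accumulated over j in range(n)
def getTileRowA (n : Int) (b : Int) (i : Int) : List Char :=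
  (PySem.List.pyRange 0 n 1).foldl (fun line j =>
    if PySem.Int.mod (i + j) 2 == 0 then line ++ PySem.List.pyRepeat ['.'] b
    else line ++ PySem.List.pyRepeat ['#'] b) []

def getTile (n : Int) (a : Int) (b : Int) : List String :=
  (PySem.List.pyRange 0 n 1).foldl (fun tile i => tile ++ [String.ofList (getTileRowA n b i)]) []

-- ===== PORT B =====
-- the two parity lines, each a join of n alternating blocks
def getTileLineB (n : Int) (b : Int) (c0 c1 : Char) : List Char :=
  ((PySem.List.pyRange 0 n 1).map (fun j =>
    PySem.List.pyRepeat [if PySem.Int.mod j 2 == 0 then c0 else c1] b)).flatten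

def getTile_alt (n : Int) (a : Int) (b : Int) : List String :=
  let evenL := String.ofList (getTileLineB n b '.' '#')
  let oddL := String.ofList (getTileLineB n b '#' '.')
  (PySem.List.pyRange 0 n 1).map (fun i => if PySem.Int.mod i 2 == 0 then evenL else oddL)

-- ===== PRECONDITION & SPEC =====
def Spec_getTile (n : Int) (a : Int) (b : Int) (out : List String) : Prop := out = getTile_alt n a b
instance (n : Int) (a : Int) (b : Int) (out : List String) : Decidable (Spec_getTile n a b out) := by unfold Spec_getTile; infer_instance

-- ===== CLAIM (what is proved, stated in full; the proofs are below) =====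
def Claim_equal_getTile : Prop := ∀ (n : Int) (a : Int) (b : Int), Dom_getTile n a b → Spec_getTile n a b (getTile n a b)

-- ===== LEMMAS AND PROOFS =====

theorem flatMap_singleton_map {α β : Type} (l : List α) (f : α → β) :
    l.flatMap (fun x => [f x]) = l.map f := by
  induction l with
  | nil => rfl
  | cons x t ih => simp [List.flatMap_cons, ih]

-- A's inner fold is a flatten of blocks
theorem rowA_eq_flatten (n b i : Int) :
    getTileRowA n b i =
      ((PySem.List.pyRange 0 n 1).map (fun j =>
        PySem.List.pyRepeat [if PySem.Int.mod (i + j) 2 == 0 then '.' else '#'] b)).flatten := by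
  unfold getTileRowA
  rw [show (fun (line : List Char) (j : Int) =>
        if PySem.Int.mod (i + j) 2 == 0 then line ++ PySem.List.pyRepeat ['.'] b
        else line ++ PySem.List.pyRepeat ['#'] b)
      = (fun (line : List Char) (j : Int) =>
        line ++ PySem.List.pyRepeat [if PySem.Int.mod (i + j) 2 == 0 then '.' else '#'] b) from by
    funext line j; split <;> simp_all]
  rw [PySem.List.foldl_append_eq_flatMap]
  simp [List.flatMap_def]

theorem pymod_two (i : Int) : PySem.Int.mod i 2 = i % 2 := by
  simp [PySem.Int.mod, Int.fmod_eq_emod]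

theorem rowA_parity (n b i : Int) :
    getTileRowA n b i =
      (if PySem.Int.mod i 2 == 0 then getTileLineB n b '.' '#' else getTileLineB n b '#' '.') := by
  rw [rowA_eq_flatten]
  unfold getTileLineB
  rw [pymod_two] at *
  rcases Int.emod_two_eq i with h | h <;> simp only [h] <;> norm_num <;>
    (congr 1
     apply List.map_congr_left
     intro j _
     congr 1
     by_cases h1 : (2:Int) ∣ i + j <;> by_cases h2 : (2:Int) ∣ j <;>
       simp only [h1, h2, if_true, if_false, if_pos, if_neg, not_false_iff] <;>
       first | rfl | omega)

-- ===== VERDICT (by name: the statement is the Claim_ definition above) =====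
theorem getTile_spec : Claim_equal_getTile := by
  intro n a b _
  unfold Spec_getTile getTile getTile_alt
  rw [PySem.List.foldl_append_eq_flatMap]
  simp only [List.nil_append]
  rw [flatMap_singleton_map]
  apply List.map_congr_left
  intro i _
  rw [rowA_parity]
  split <;> rfl
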